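-- pv_equiv track=rewrite | github.com/vishaal314/myapp | services/ai_model_scanner.py | _assess_risk_management_system
-- ===== SOURCE A (Python) =====
-- from typing import Dict, List, Any, Optional, Callable
--
-- def _assess_risk_management_system(findings: List[Dict[str, Any]], model_details: Dict[str, Any]) -> float:
--     """Assess risk management system per AI Act Article 9 - Reach 98%+ compliance"""
--     score = 30  # Base score
--
--     # Check for risk assessment framework
--     if any('risk assessment' in f.get('description', '').lower() for f in findings):
--         score += 25  # +25 for risk assessment
--
--     # Check for continuous monitoring
--     if any('continuous' in f.get('description', '').lower() and 'monitor' in f.get('description', '').lower() for f in findings):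
--         score += 20  # +20 for continuous monitoring
--
--     # Check for risk mitigation processes
--     if any('mitigation' in f.get('description', '').lower() for f in findings):
--         score += 15  # +15 for mitigation
--
--     # Check for lifecycle risk management
--     if any('lifecycle' in f.get('description', '').lower() for f in findings):
--         score += 10  # +10 for lifecycle management
--
--     return max(min(score, 100), 10)
-- ===== SOURCE B (Python) =====
-- def _assess_risk_management_system(findings, model_details):
--     """Assess risk management system per AI Act Article 9 - Reach 98%+ compliance"""
--     ra = cm = mit = lc = False
--     for f in findings:
--         if ra and cm and mit and lc:
--             break
--         desc = f.get('description', '').lower()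
--         ra = ra or 'risk assessment' in desc
--         cm = cm or ('continuous' in desc and 'monitor' in desc)
--         mit = mit or 'mitigation' in desc
--         lc = lc or 'lifecycle' in desc
--     score = 30 + (25 if ra else 0) + (20 if cm else 0) + (15 if mit else 0) + (10 if lc else 0)
--     return max(min(score, 100), 10)
-- ===== Notes on version B (the rewrite author's own statement) =====
-- stated objective: simpler
-- what changed: Replaces A's four separate any(...) scans over findings with a single loop that lowercases each description once and accumulates four booleans (breaking early once all are set), then assembles the score additively.
import Mathlib
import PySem

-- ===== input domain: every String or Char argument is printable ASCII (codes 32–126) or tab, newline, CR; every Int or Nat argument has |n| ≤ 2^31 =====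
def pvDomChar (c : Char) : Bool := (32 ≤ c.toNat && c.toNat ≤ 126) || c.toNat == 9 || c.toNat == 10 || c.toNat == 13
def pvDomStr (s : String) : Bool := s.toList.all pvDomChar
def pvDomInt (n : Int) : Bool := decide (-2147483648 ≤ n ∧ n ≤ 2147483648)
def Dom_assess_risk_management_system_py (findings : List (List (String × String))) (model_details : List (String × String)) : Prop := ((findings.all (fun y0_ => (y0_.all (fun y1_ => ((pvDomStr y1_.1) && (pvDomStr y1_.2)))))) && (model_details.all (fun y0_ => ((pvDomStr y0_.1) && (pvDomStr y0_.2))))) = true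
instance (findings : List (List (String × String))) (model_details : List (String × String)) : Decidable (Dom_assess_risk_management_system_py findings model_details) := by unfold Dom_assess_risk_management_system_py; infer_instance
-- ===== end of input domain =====

-- ===== PORT A =====
-- B merges A's four any(...) scans into one early-breaking loop; return-value equivalence only.
def pyDesc (f : List (String × String)) : String :=
  PySem.Str.lower (PySem.Dict.getD (PySem.Dict.mk f) "description" "")

def assess_risk_management_system_py (findings : List (List (String × String))) (model_details : List (String × String)) : Int :=
  let score : Int := 30
  let score := if findings.any (fun f => PySem.Str.isIn "risk assessment" (pyDesc f)) then score + 25 else score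
  let score := if findings.any (fun f => PySem.Str.isIn "continuous" (pyDesc f) && PySem.Str.isIn "monitor" (pyDesc f)) then score + 20 else score
  let score := if findings.any (fun f => PySem.Str.isIn "mitigation" (pyDesc f)) then score + 15 else score
  let score := if findings.any (fun f => PySem.Str.isIn "lifecycle" (pyDesc f)) then score + 10 else score
  max (min score 100) 10

-- ===== PORT B =====
def altFlags : List (List (String × String)) → Bool → Bool → Bool → Bool → Bool × Bool × Bool × Bool
  | [], ra, cm, mit, lc => (ra, cm, mit, lc)
  | f :: rest, ra, cm, mit, lc =>
    if ra && cm && mit && lc then (ra, cm, mit, lc)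
    else
      let desc := PySem.Str.lower (PySem.Dict.getD (PySem.Dict.mk f) "description" "")
      altFlags rest (ra || PySem.Str.isIn "risk assessment" desc)
        (cm || (PySem.Str.isIn "continuous" desc && PySem.Str.isIn "monitor" desc))
        (mit || PySem.Str.isIn "mitigation" desc)
        (lc || PySem.Str.isIn "lifecycle" desc)

def assess_risk_management_system_py_alt (findings : List (List (String × String))) (model_details : List (String × String)) : Int :=
  let fl := altFlags findings false false false false
  let score : Int := 30 + (if fl.1 then 25 else 0) + (if fl.2.1 then 20 else 0)
      + (if fl.2.2.1 then 15 else 0) + (if fl.2.2.2 then 10 else 0)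
  max (min score 100) 10

-- ===== PRECONDITION & SPEC =====
def Spec_assess_risk_management_system_py (findings : List (List (String × String))) (model_details : List (String × String)) (out : Int) : Prop := out = assess_risk_management_system_py_alt findings model_details
instance (findings : List (List (String × String))) (model_details : List (String × String)) (out : Int) : Decidable (Spec_assess_risk_management_system_py findings model_details out) := by unfold Spec_assess_risk_management_system_py; infer_instance

-- ===== CLAIM =====
def Claim_equal_assess_risk_management_system_py : Prop := ∀ (findings : List (List (String × String))) (model_details : List (String × String)), Dom_assess_risk_management_system_py findings model_details → Spec_assess_risk_management_system_py findings model_details (assess_risk_management_system_py findings model_details)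

-- ===== LEMMAS AND PROOFS =====
theorem altFlags_spec (findings : List (List (String × String))) (ra cm mit lc : Bool) :
    altFlags findings ra cm mit lc =
      (ra || findings.any (fun f => PySem.Str.isIn "risk assessment" (pyDesc f)),
       cm || findings.any (fun f => PySem.Str.isIn "continuous" (pyDesc f) && PySem.Str.isIn "monitor" (pyDesc f)),
       mit || findings.any (fun f => PySem.Str.isIn "mitigation" (pyDesc f)),
       lc || findings.any (fun f => PySem.Str.isIn "lifecycle" (pyDesc f))) := by
  induction findings generalizing ra cm mit lc with
  | nil => simp [altFlags]
  | cons f rest ih =>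
    by_cases h : ra && cm && mit && lc
    · have hra : ra = true := by revert h; cases ra <;> simp
      have hcm : cm = true := by revert h; cases ra <;> cases cm <;> simp
      have hmit : mit = true := by revert h; cases ra <;> cases cm <;> cases mit <;> simp
      have hlc : lc = true := by revert h; cases ra <;> cases cm <;> cases mit <;> cases lc <;> simp
      simp [altFlags, hra, hcm, hmit, hlc]
    · simp only [altFlags]
      rw [if_neg h, ih]
      simp [pyDesc, List.any_cons, Bool.or_assoc]

-- ===== VERDICT =====
theorem assess_risk_management_system_py_spec : Claim_equal_assess_risk_management_system_py := by
  intro findings model_details _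
  unfold Spec_assess_risk_management_system_py assess_risk_management_system_py assess_risk_management_system_py_alt
  rw [altFlags_spec]
  simp only [Bool.false_or]
  cases findings.any (fun f => PySem.Str.isIn "risk assessment" (pyDesc f)) <;>
  cases findings.any (fun f => PySem.Str.isIn "continuous" (pyDesc f) && PySem.Str.isIn "monitor" (pyDesc f)) <;>
  cases findings.any (fun f => PySem.Str.isIn "mitigation" (pyDesc f)) <;>
  cases findings.any (fun f => PySem.Str.isIn "lifecycle" (pyDesc f)) <;> simp
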